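-- pv_equiv track=rewrite | github.com/beenycool/yotuubef | src/processing/enhanced_thumbnail_generator.py | _get_emoji_positions
-- ===== SOURCE A (Python) =====
-- from typing import Dict, List, Optional, Tuple, Any
--
-- def _get_emoji_positions(img_size: Tuple[int, int], num_emojis: int) -> List[Tuple[int, int]]:
--     """Get strategic emoji positions for thumbnail"""
--     width, height = img_size
--     positions = []
--
--     # Distribute emojis across the image
--     for i in range(num_emojis):
--         if i == 0:
--             # Top left
--             pos = (30, 80)
--         elif i == 1:
--             # Top right
--             pos = (width - 80, 80)
--         elif i == 2:
--             # Bottom left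
--             pos = (30, height - 80)
--         else:
--             # Bottom right
--             pos = (width - 80, height - 80)
--
--         positions.append(pos)
--
--     return positions
-- ===== SOURCE B (Python) =====
-- from typing import List, Tuple
--
-- def _get_emoji_positions(img_size: Tuple[int, int], num_emojis: int) -> List[Tuple[int, int]]:
--     """Get strategic emoji positions for thumbnail"""
--     width, height = img_size
--     corners = [(30, 80), (width - 80, 80), (30, height - 80), (width - 80, height - 80)]
--     n = max(num_emojis, 0)
--     # first min(n,4) distinct corners, then the bottom-right corner repeated
--     return corners[:n] + [(width - 80, height - 80)] * (n - 4)
-- ===== Notes on version B (the rewrite author's own statement) =====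
-- stated objective: simpler
-- what changed: Eliminated the per-index loop with if/elif dispatch: B builds the result as the 4-corner list sliced to n concatenated with n-4 replications of the bottom-right corner.
import Mathlib
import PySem

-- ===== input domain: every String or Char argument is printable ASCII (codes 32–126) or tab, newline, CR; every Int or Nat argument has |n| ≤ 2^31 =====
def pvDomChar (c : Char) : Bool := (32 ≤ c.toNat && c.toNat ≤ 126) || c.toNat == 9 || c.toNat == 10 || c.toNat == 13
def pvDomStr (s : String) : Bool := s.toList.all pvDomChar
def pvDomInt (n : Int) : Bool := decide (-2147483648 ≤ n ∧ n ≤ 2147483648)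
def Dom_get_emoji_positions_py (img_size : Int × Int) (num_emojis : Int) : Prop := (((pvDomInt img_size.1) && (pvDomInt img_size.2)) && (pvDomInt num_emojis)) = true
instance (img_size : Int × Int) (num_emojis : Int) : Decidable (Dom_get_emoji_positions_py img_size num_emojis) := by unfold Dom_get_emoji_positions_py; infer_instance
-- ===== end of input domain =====

-- ===== PORT A =====
-- B replaces the per-index loop with if/elif dispatch by slicing the 4-corner list to n and appending n-4 replications of the last corner; same return values.
def get_emoji_positions_py (img_size : Int × Int) (num_emojis : Int) : List (Int × Int) :=
  let width := img_size.1
  let height := img_size.2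
  (PySem.List.pyRange 0 num_emojis 1).foldl (fun positions i =>
    let pos : Int × Int :=
      if i == 0 then (30, 80)
      else if i == 1 then (width - 80, 80)
      else if i == 2 then (30, height - 80)
      else (width - 80, height - 80)
    positions ++ [pos]) []

-- ===== PORT B =====
def get_emoji_positions_py_alt (img_size : Int × Int) (num_emojis : Int) : List (Int × Int) :=
  let width := img_size.1
  let height := img_size.2
  let corners : List (Int × Int) := [(30, 80), (width - 80, 80), (30, height - 80), (width - 80, height - 80)]
  let n := max num_emojis 0
  -- corners[:n] ++ [(width-80, height-80)] * (n-4); Python list * k is empty for k ≤ 0, as toNat gives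
  PySem.List.slice corners none (some n) ++ List.replicate (n - 4).toNat (width - 80, height - 80)

-- ===== PRECONDITION & SPEC =====
def Spec_get_emoji_positions_py (img_size : Int × Int) (num_emojis : Int) (out : List (Int × Int)) : Prop := out = get_emoji_positions_py_alt img_size num_emojis
instance (img_size : Int × Int) (num_emojis : Int) (out : List (Int × Int)) : Decidable (Spec_get_emoji_positions_py img_size num_emojis out) := by unfold Spec_get_emoji_positions_py; infer_instance

-- ===== CLAIM (what is proved, stated in full; the proofs are below) =====
def Claim_equal_get_emoji_positions_py : Prop := ∀ (img_size : Int × Int) (num_emojis : Int), Dom_get_emoji_positions_py img_size num_emojis → Spec_get_emoji_positions_py img_size num_emojis (get_emoji_positions_py img_size num_emojis)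

-- ===== LEMMAS AND PROOFS =====

-- range m mapped through the corner dispatch equals corners truncated to m plus replicated last corner
theorem range_map_corners (w h : Int) (m : Nat) :
    (List.range m).map (fun k : Nat =>
      if ((k : Int) == 0) then ((30 : Int), (80 : Int))
      else if ((k : Int) == 1) then (w - 80, 80)
      else if ((k : Int) == 2) then ((30 : Int), h - 80)
      else (w - 80, h - 80)) =
    ([(30, 80), (w - 80, 80), (30, h - 80), (w - 80, h - 80)] : List (Int × Int)).take m
      ++ List.replicate (m - 4) (w - 80, h - 80) := by
  induction m with
  | zero => simp
  | succ m ih =>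
    rw [List.range_succ, List.map_append, ih, List.map_singleton]
    match m with
    | 0 => simp
    | 1 => simp
    | 2 => simp
    | 3 => simp
    | (Nat.succ (Nat.succ (Nat.succ (Nat.succ m)))) =>
      have h0 : ¬ ((m + 4 : Nat) : Int) == 0 := by simp; omega
      have h1 : ¬ ((m + 4 : Nat) : Int) == 1 := by simp; omega
      have h2 : ¬ ((m + 4 : Nat) : Int) == 2 := by simp; omega
      simp only [h0, h1, h2, if_false, Bool.false_eq_true]
      rw [List.take_of_length_le (by simp), List.take_of_length_le (by simp)]
      rw [List.append_assoc]
      congr 1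
      have : m + 4 + 1 - 4 = (m + 4 - 4) + 1 := by omega
      rw [this, List.replicate_succ']

-- ===== VERDICT (by name: the statement is the Claim_ definition above) =====
theorem get_emoji_positions_py_spec : Claim_equal_get_emoji_positions_py := by
  intro img num _
  unfold Spec_get_emoji_positions_py get_emoji_positions_py get_emoji_positions_py_alt
  rw [PySem.List.foldl_append_singleton_eq_map]
  simp only [List.nil_append, PySem.List.pyRange_one, List.map_map]
  have hmax : max num 0 = ((num.toNat : Nat) : Int) := by omega
  rw [hmax, PySem.List.slice_to_natCast]
  have htn : (((num.toNat : Nat) : Int) - 4).toNat = num.toNat - 4 := by omega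
  rw [htn]
  have hsub : (num - 0).toNat = num.toNat := by omega
  rw [hsub]
  have := range_map_corners img.1 img.2 num.toNat
  rw [← this]
  apply List.map_congr_left
  intro k _
  simp
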